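-- pv_equiv track=rewrite | github.com/Mateusz-Wojciechowski/keyword-extraction | functionalities.py | create_phrase_list
-- ===== SOURCE A (Python) =====
-- def create_phrase_list(words, stop_words, punctuation):
--     phrases_list = []
--     phrase = []
--     for word in words:
--         if word.lower() in stop_words or word in punctuation:
--             if phrase:
--                 phrases_list.append(' '.join(phrase))
--                 phrase = []
--         else:
--             phrase.append(word)
--
--     if phrase:
--         phrases_list.append(' '.join(phrase))
--     return phrases_list
-- ===== SOURCE B (Python) =====
-- from itertools import groupby
--
-- def create_phrase_list(words, stop_words, punctuation):
--     def is_sep(word):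
--         return word.lower() in stop_words or word in punctuation
--     return [' '.join(group) for key, group in groupby(words, key=is_sep) if not key]
-- ===== Notes on version B (the rewrite author's own statement) =====
-- stated objective: idiomatic
-- what changed: Replaces the explicit accumulator loop with a separator flush by itertools.groupby over the separator predicate, joining each maximal non-separator run in a comprehension.
import Mathlib
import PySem

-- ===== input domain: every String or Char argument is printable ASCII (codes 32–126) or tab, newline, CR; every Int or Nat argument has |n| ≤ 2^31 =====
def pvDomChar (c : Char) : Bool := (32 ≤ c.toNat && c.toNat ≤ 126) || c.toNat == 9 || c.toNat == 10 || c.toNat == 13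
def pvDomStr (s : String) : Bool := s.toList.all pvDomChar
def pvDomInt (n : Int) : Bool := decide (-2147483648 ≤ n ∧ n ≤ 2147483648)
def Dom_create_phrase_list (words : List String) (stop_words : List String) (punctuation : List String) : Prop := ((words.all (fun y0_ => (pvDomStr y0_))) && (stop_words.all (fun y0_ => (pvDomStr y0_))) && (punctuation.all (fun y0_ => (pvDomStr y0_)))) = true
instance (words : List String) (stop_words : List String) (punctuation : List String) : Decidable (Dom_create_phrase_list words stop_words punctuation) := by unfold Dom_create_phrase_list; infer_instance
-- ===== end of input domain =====

-- B replaces A's accumulator-and-flush loop with a groupby-style split into maximal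
-- non-separator runs (takeWhile/dropWhile), joining each run; idiomatic, same cost.


-- ===== PORT A =====
-- literal transliteration of A: fold over words with state (phrases_list, phrase), final flush
def create_phrase_list (words : List String) (stop_words : List String) (punctuation : List String) : List String :=
  let st := words.foldl
    (fun (st : List String × List String) word =>
      if stop_words.contains (PySem.Str.lower word) || punctuation.contains word then
        if !st.2.isEmpty then (st.1 ++ [PySem.Str.join " " st.2], []) else st
      else (st.1, st.2 ++ [word]))
    ([], [])
  if !st.2.isEmpty then st.1 ++ [PySem.Str.join " " st.2] else st.1

-- ===== PORT B =====
-- groupby over the separator predicate: skip separator runs, join each maximal non-separator run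
def pvAltGo (sep : String → Bool) : List String → List String
  | [] => []
  | w :: ws =>
    if sep w then pvAltGo sep ws
    else PySem.Str.join " " (w :: ws.takeWhile (fun x => !sep x)) ::
         pvAltGo sep (ws.dropWhile (fun x => !sep x))
termination_by ws => ws.length
decreasing_by
  all_goals simp only [List.length_cons]
  · omega
  · have := List.length_dropWhile_le (fun x => !sep x) ws; omega

def create_phrase_list_alt (words : List String) (stop_words : List String) (punctuation : List String) : List String :=
  pvAltGo (fun w => stop_words.contains (PySem.Str.lower w) || punctuation.contains w) words

-- ===== PRECONDITION & SPEC =====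
def Spec_create_phrase_list (words : List String) (stop_words : List String) (punctuation : List String) (out : List String) : Prop := out = create_phrase_list_alt words stop_words punctuation
instance (words : List String) (stop_words : List String) (punctuation : List String) (out : List String) : Decidable (Spec_create_phrase_list words stop_words punctuation out) := by unfold Spec_create_phrase_list; infer_instance

-- ===== CLAIM (what is proved, stated in full; the proofs are below) =====
def Claim_equal_create_phrase_list : Prop := ∀ (words : List String) (stop_words : List String) (punctuation : List String), Dom_create_phrase_list words stop_words punctuation → Spec_create_phrase_list words stop_words punctuation (create_phrase_list words stop_words punctuation)

-- ===== LEMMAS AND PROOFS =====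

theorem pvAltGo_nil (sep : String → Bool) : pvAltGo sep [] = [] := by simp [pvAltGo]

theorem pvAltGo_cons (sep : String → Bool) (w : String) (ws : List String) :
    pvAltGo sep (w :: ws) = if sep w then pvAltGo sep ws
    else PySem.Str.join " " (w :: ws.takeWhile (fun x => !sep x)) ::
         pvAltGo sep (ws.dropWhile (fun x => !sep x)) := by
  rw [pvAltGo]

-- what B computes when a phrase `ph` is still pending before scanning `ws`
def pvCont (sep : String → Bool) (ph : List String) (ws : List String) : List String :=
  if ph.isEmpty then pvAltGo sep ws
  else PySem.Str.join " " (ph ++ ws.takeWhile (fun x => !sep x)) ::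
       pvAltGo sep (ws.dropWhile (fun x => !sep x))

theorem pv_loop_eq (sep : String → Bool) :
    ∀ (ws pl ph : List String),
      (let st := ws.foldl
        (fun (st : List String × List String) word =>
          if sep word then
            if !st.2.isEmpty then (st.1 ++ [PySem.Str.join " " st.2], []) else st
          else (st.1, st.2 ++ [word])) (pl, ph);
       if !st.2.isEmpty then st.1 ++ [PySem.Str.join " " st.2] else st.1)
      = pl ++ pvCont sep ph ws := by
  intro ws
  induction ws with
  | nil =>
    intro pl ph
    by_cases h : ph.isEmpty <;> simp [pvCont, pvAltGo_nil, h]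
  | cons w ws ih =>
    intro pl ph
    by_cases hs : sep w
    · by_cases hp : ph.isEmpty
      · have hph : ph = [] := List.isEmpty_iff.mp hp
        subst hph
        simp only [List.foldl_cons, hs, if_true, List.isEmpty_nil, Bool.not_true,
          Bool.false_eq_true, if_false]
        rw [ih pl []]
        simp [pvCont, pvAltGo_cons, hs]
      · simp only [List.foldl_cons, hs, if_true, hp, Bool.not_false, if_true]
        rw [ih (pl ++ [PySem.Str.join " " ph]) []]
        simp [pvCont, pvAltGo_cons, hp, hs, List.append_assoc]
    · simp only [List.foldl_cons, hs, Bool.false_eq_true, if_false]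
      rw [ih pl (ph ++ [w])]
      by_cases hp : ph.isEmpty
      · have hph : ph = [] := List.isEmpty_iff.mp hp
        subst hph
        simp [pvCont, pvAltGo_cons, hs]
      · simp [pvCont, hp, hs, List.append_assoc]

-- ===== VERDICT (by name: the statement is the Claim_ definition above) =====
theorem create_phrase_list_spec : Claim_equal_create_phrase_list := by
  intro words stop_words punctuation _
  unfold Spec_create_phrase_list create_phrase_list create_phrase_list_alt
  have := pv_loop_eq (fun w => stop_words.contains (PySem.Str.lower w) || punctuation.contains w) words [] []
  simpa [pvCont] using this
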